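-- pv_equiv track=rewrite | github.com/taddeus/advent-of-code | 2016/07_ips.py | sequences
-- ===== SOURCE A (Python) =====
-- from collections import deque
--
-- def sequences(ip, length):
--     buf = deque()
--     in_brackets = False
--     for char in ip:
--         if char in '[]':
--             in_brackets = char == '['
--             buf.clear()
--         else:
--             buf.append(char)
--             if len(buf) == length:
--                 yield ''.join(buf), in_brackets
--                 buf.popleft()
-- ===== SOURCE B (Python) =====
-- def sequences(ip, length):
--     # One-shot partition into (segment, in_brackets) pairs, then slide a window over each segment.
--     if length < 1:
--         return
--     segments = []
--     cur = []
--     flag = False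
--     for ch in ip:
--         if ch in '[]':
--             segments.append((''.join(cur), flag))
--             cur = []
--             flag = ch == '['
--         else:
--             cur.append(ch)
--     segments.append((''.join(cur), flag))
--     for seg, f in segments:
--         for i in range(len(seg) - length + 1):
--             yield seg[i:i+length], f
-- ===== Notes on version B (the rewrite author's own statement) =====
-- stated objective: alternative
-- what changed: A slides a rolling deque through the string, re-joining the buffer at every yield; B first partitions the string once into (segment, in_brackets) pairs at the brackets and then slices every fixed-length window seg[i:i+length] out of each already-joined segment string.
import Mathlib
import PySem

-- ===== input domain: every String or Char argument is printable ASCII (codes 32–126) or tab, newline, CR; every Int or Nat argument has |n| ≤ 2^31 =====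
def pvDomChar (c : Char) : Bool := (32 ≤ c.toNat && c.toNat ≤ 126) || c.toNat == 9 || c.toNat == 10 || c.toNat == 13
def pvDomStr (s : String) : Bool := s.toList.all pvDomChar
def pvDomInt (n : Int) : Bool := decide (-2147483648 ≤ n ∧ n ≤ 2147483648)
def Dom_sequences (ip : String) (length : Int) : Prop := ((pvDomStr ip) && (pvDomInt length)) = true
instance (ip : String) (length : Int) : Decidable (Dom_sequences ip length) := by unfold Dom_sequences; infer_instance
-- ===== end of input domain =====

-- B replaces A's rolling deque with a partition-into-segments pass followed by slicing
-- fixed-length windows out of each segment (objective: alternative decomposition, same cost).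

-- ===== PORT A =====
-- state: (buf, in_brackets, yielded so far)
def seqA_step (length : Int) (st : List Char × Bool × List (String × Bool)) (c : Char) :
    List Char × Bool × List (String × Bool) :=
  if c = '[' ∨ c = ']' then ([], c == '[', st.2.2)
  else
    let buf := st.1 ++ [c]
    if (buf.length : Int) = length then
      (buf.drop 1, st.2.1, st.2.2 ++ [(String.ofList buf, st.2.1)])
    else (buf, st.2.1, st.2.2)

def sequences (ip : String) (length : Int) : List (String × Bool) :=
  (ip.toList.foldl (seqA_step length) ([], false, [])).2.2

-- ===== PORT B =====
-- partition pass: flush (cur, flag) on every bracket, and once more at the end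
def seqB_step (st : List (List Char × Bool) × List Char × Bool) (c : Char) :
    List (List Char × Bool) × List Char × Bool :=
  if c = '[' ∨ c = ']' then (st.1 ++ [(st.2.1, st.2.2)], [], c == '[')
  else (st.1, st.2.1 ++ [c], st.2.2)

def seqB_segs (ip : List Char) : List (List Char × Bool) :=
  let st := ip.foldl seqB_step ([], [], false)
  st.1 ++ [(st.2.1, st.2.2)]

-- all windows seg[i:i+length] of one segment
def seqB_windows (length : Int) (seg : List Char) : List (List Char) :=
  (PySem.List.pyRange 0 ((seg.length : Int) - length + 1) 1).map
    (fun i => PySem.List.slice seg (some i) (some (i + length)))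

def sequences_alt (ip : String) (length : Int) : List (String × Bool) :=
  if length < 1 then []
  else (seqB_segs ip.toList).flatMap
    (fun p => (seqB_windows length p.1).map (fun w => (String.ofList w, p.2)))

-- ===== PRECONDITION & SPEC =====
def Spec_sequences (ip : String) (length : Int) (out : List (String × Bool)) : Prop := out = sequences_alt ip length
instance (ip : String) (length : Int) (out : List (String × Bool)) : Decidable (Spec_sequences ip length out) := by unfold Spec_sequences; infer_instance

-- ===== CLAIM (what is proved, stated in full; the proofs are below) =====
def Claim_equal_sequences : Prop := ∀ (ip : String) (length : Int), Dom_sequences ip length → Spec_sequences ip length (sequences ip length)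

-- ===== LEMMAS AND PROOFS =====

-- proof-side helpers -------------------------------------------------------

-- the Nat-indexed windows of a list
def natWindows (k : Nat) (l : List Char) : List (List Char) :=
  (List.range (l.length + 1 - k)).map (fun i => (l.drop i).take k)

-- suffix of l of length min (l.length) (k-1): A's buffer state mid-segment
def sfx (k : Nat) (l : List Char) : List Char := l.drop (l.length + 1 - k)

-- recursion form of B's partition pass, starting mid-segment
def segsFrom (l : List Char) (cur : List Char) (flag : Bool) : List (List Char × Bool) :=
  match l with
  | [] => [(cur, flag)]
  | c :: cs =>
    if c = '[' ∨ c = ']' then (cur, flag) :: segsFrom cs [] (c == '[')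
    else segsFrom cs (cur ++ [c]) flag

def bres (k : Nat) (segs : List (List Char × Bool)) : List (String × Bool) :=
  segs.flatMap (fun p => (natWindows k p.1).map (fun w => (String.ofList w, p.2)))

lemma natWindows_nil (k : Nat) (hk : 1 ≤ k) : natWindows k [] = [] := by
  simp [natWindows]; omega

lemma natWindows_snoc (k : Nat) (hk : 1 ≤ k) (l : List Char) (c : Char) :
    natWindows k (l ++ [c]) =
      natWindows k l ++
        (if k ≤ l.length + 1 then [((l ++ [c]).drop (l.length + 1 - k)).take k] else []) := by
  unfold natWindows
  by_cases h : k ≤ l.length + 1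
  · have h1 : l.length + 1 + 1 - k = (l.length + 1 - k) + 1 := by omega
    rw [List.length_append]
    simp only [List.length_singleton, h1, List.range_succ, List.map_append, List.map_cons,
      List.map_nil, if_pos h]
    congr 1
    apply List.map_congr_left
    intro i hi
    have hi' : i < l.length + 1 - k := List.mem_range.mp hi
    rw [List.drop_append_of_le_length (by omega)]
    rw [List.take_append_of_le_length (by simp; omega)]
  · have h1 : l.length + 1 + 1 - k = 0 := by omega
    have h2 : l.length + 1 - k = 0 := by omega
    rw [List.length_append]
    simp [h1, h2, h]

lemma sfx_nil (k : Nat) : sfx k [] = [] := by simp [sfx]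

-- one non-bracket step of A, seen through the invariant
lemma stepA_nonbracket (k : Nat) (hk : 1 ≤ k) (cur : List Char) (flag : Bool)
    (out : List (String × Bool)) (c : Char) (hc : ¬ (c = '[' ∨ c = ']')) :
    seqA_step (k : Int) (sfx k cur, flag, out ++ (natWindows k cur).map (fun w => (String.ofList w, flag))) c
      = (sfx k (cur ++ [c]), flag, out ++ (natWindows k (cur ++ [c])).map (fun w => (String.ofList w, flag))) := by
  unfold seqA_step
  rw [if_neg hc]
  have hlen : (sfx k cur).length = cur.length - (cur.length + 1 - k) := by
    simp [sfx]
  by_cases h : k ≤ cur.length + 1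
  · have hbl : ((sfx k cur ++ [c]).length : Int) = ((k : Nat) : Int) := by
      rw [List.length_append, hlen]; simp; omega
    simp only [List.append_nil]
    rw [if_pos hbl]
    have hdrop : sfx k cur ++ [c] = (cur ++ [c]).drop (cur.length + 1 - k) := by
      rw [List.drop_append_of_le_length (by omega)]; rfl
    have htake : ((cur ++ [c]).drop (cur.length + 1 - k)).take k = (cur ++ [c]).drop (cur.length + 1 - k) := by
      apply List.take_of_length_le
      simp; omega
    have hA : List.drop 1 (sfx k cur ++ [c]) = sfx k (cur ++ [c]) := by
      rw [hdrop]
      unfold sfx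
      rw [List.drop_drop]
      congr 1
      simp
      omega
    have hB : natWindows k (cur ++ [c]) = natWindows k cur ++ [sfx k cur ++ [c]] := by
      rw [natWindows_snoc k hk cur c, if_pos h, htake, ← hdrop]
    rw [hA, hB]
    simp [List.append_assoc]
  · have hbl : ¬ (((sfx k cur ++ [c]).length : Int) = ((k : Nat) : Int)) := by
      rw [List.length_append, hlen]
      simp only [List.length_singleton]
      intro hcon
      have : cur.length - (cur.length + 1 - k) + 1 = k := by exact_mod_cast hcon
      omega
    simp only [List.append_nil]
    rw [if_neg hbl]
    have hcur : sfx k cur = cur := by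
      simp [sfx, Nat.sub_eq_zero_of_le (by omega : cur.length + 1 ≤ k)]
    have hcur' : sfx k (cur ++ [c]) = cur ++ [c] := by
      unfold sfx
      rw [show (cur ++ [c]).length + 1 - k = 0 by
        simp only [List.length_append, List.length_singleton]; omega]
      rfl
    rw [natWindows_snoc k hk cur c, if_neg h]
    simp [hcur, hcur']

-- main invariant: running A's loop mid-segment produces exactly B's windows of the remaining stream
lemma mainA (k : Nat) (hk : 1 ≤ k) (l : List Char) :
    ∀ (cur : List Char) (flag : Bool) (out : List (String × Bool)),
      (l.foldl (seqA_step (k : Int))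
        (sfx k cur, flag, out ++ (natWindows k cur).map (fun w => (String.ofList w, flag)))).2.2
      = out ++ bres k (segsFrom l cur flag) := by
  induction l with
  | nil =>
    intro cur flag out
    simp [segsFrom, bres]
  | cons c cs ih =>
    intro cur flag out
    by_cases hc : c = '[' ∨ c = ']'
    · rw [List.foldl_cons]
      have hstep : seqA_step (k : Int)
          (sfx k cur, flag, out ++ (natWindows k cur).map (fun w => (String.ofList w, flag))) c
          = (sfx k [], (c == '['), (out ++ (natWindows k cur).map (fun w => (String.ofList w, flag)))
              ++ (natWindows k []).map (fun w => (String.ofList w, (c == '[')))) := by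
        unfold seqA_step
        rw [if_pos hc]
        simp [sfx_nil, natWindows_nil k hk]
      rw [hstep, ih [] (c == '[') _]
      simp only [segsFrom, if_pos hc, bres, List.flatMap_cons]
      simp [bres, List.append_assoc]
    · rw [List.foldl_cons, stepA_nonbracket k hk cur flag out c hc, ih (cur ++ [c]) flag out]
      simp [segsFrom, hc]

-- B's fold equals the recursive partition
lemma segsB_eq (l : List Char) :
    ∀ (acc : List (List Char × Bool)) (cur : List Char) (flag : Bool),
      (l.foldl seqB_step (acc, cur, flag)).1
        ++ [((l.foldl seqB_step (acc, cur, flag)).2.1, (l.foldl seqB_step (acc, cur, flag)).2.2)]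
      = acc ++ segsFrom l cur flag := by
  induction l with
  | nil => intro acc cur flag; simp [segsFrom]
  | cons c cs ih =>
    intro acc cur flag
    by_cases hc : c = '[' ∨ c = ']'
    · simp only [List.foldl_cons, seqB_step, if_pos hc, segsFrom]
      rw [ih]
      simp [List.append_assoc]
    · simp only [List.foldl_cons, seqB_step, if_neg hc, segsFrom]
      rw [ih]

-- B's windows coincide with natWindows
lemma windowsB_eq (k : Nat) (seg : List Char) :
    seqB_windows (k : Int) seg = natWindows k seg := by
  unfold seqB_windows natWindows
  rw [PySem.List.pyRange_one, List.map_map]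
  have hn : (((seg.length : Int) - (k : Int) + 1) - 0).toNat = seg.length + 1 - k := by omega
  rw [hn]
  apply List.map_congr_left
  intro i _
  simp only [Function.comp]
  have h0 : (0 : Int) + (i : Int) = ((i : Nat) : Int) := by omega
  rw [h0, PySem.List.slice_natCast_add]

-- A yields nothing when length < 1
lemma lenA_small (length : Int) (hl : length < 1) (l : List Char) :
    ∀ (buf : List Char) (flag : Bool) (out : List (String × Bool)),
      (l.foldl (seqA_step length) (buf, flag, out)).2.2 = out := by
  induction l with
  | nil => intro buf flag out; rfl
  | cons c cs ih =>
    intro buf flag out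
    rw [List.foldl_cons]
    unfold seqA_step
    by_cases hc : c = '[' ∨ c = ']'
    · rw [if_pos hc]; exact ih _ _ _
    · rw [if_neg hc]
      have hne : ¬ (((buf ++ [c]).length : Int) = length) := by
        intro h; rw [List.length_append] at h; simp at h; omega
      simp only [List.append_nil]
      rw [if_neg hne]
      exact ih _ _ _

-- ===== VERDICT (by name: the statement is the Claim_ definition above) =====
theorem sequences_spec : Claim_equal_sequences := by
  intro ip length _
  unfold Spec_sequences sequences sequences_alt
  by_cases hl : length < 1
  · rw [if_pos hl]
    exact lenA_small length hl ip.toList [] false []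
  · rw [if_neg hl]
    have hk : 1 ≤ length.toNat := by omega
    have hlen : length = (length.toNat : Int) := by omega
    rw [hlen]
    have h0 : ([] : List Char) = sfx length.toNat [] := (sfx_nil _).symm
    have h1 : ([] : List (String × Bool))
        = [] ++ (natWindows length.toNat []).map (fun w => (String.ofList w, false)) := by
      rw [natWindows_nil _ hk]; rfl
    rw [h0, h1, mainA length.toNat hk ip.toList [] false []]
    rw [List.nil_append]
    have hsegs : seqB_segs ip.toList = segsFrom ip.toList [] false := by
      simpa [seqB_segs] using segsB_eq ip.toList [] [] false
    rw [hsegs]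
    unfold bres
    have hfun : (fun p : List Char × Bool =>
        (seqB_windows ((length.toNat : Nat) : Int) p.1).map (fun w => (String.ofList w, p.2)))
        = fun p : List Char × Bool =>
        (natWindows length.toNat p.1).map (fun w => (String.ofList w, p.2)) := by
      funext p; rw [windowsB_eq]
    rw [hfun]
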